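-- pv_equiv track=rewrite | github.com/4gatepylon/gists | Algos/codeforces/997/zeros2ones.py | numZeroIslands
-- ===== SOURCE A (Python) =====
-- def numZeroIslands(s: str) -> int:
--     if len(s) == 0:
--         return 0
--     assert all([c in ['0', '1'] for c in s])
--     single_fenced = [c for i, c in enumerate(s) if i == 0 or c == '0' or s[i-1] != '1']
--     as_str = "".join(single_fenced)
--     split_into_groups = as_str.split('1')
--     filtered_groups = [g for g in split_into_groups if g != '']
--     return len(filtered_groups)
-- ===== SOURCE B (Python) =====
-- def numZeroIslands(s: str) -> int:
--     if len(s) == 0: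
--         return 0
--     assert all([c in ['0', '1'] for c in s])
--     count = 0
--     prev = '1'
--     for c in s:
--         if c == '0' and prev != '0':
--             count += 1
--         prev = c
--     return count
-- ===== Notes on version B (the rewrite author's own statement) =====
-- stated objective: simpler
-- what changed: Replaces the comprehension/join/split('1')/filter pipeline with a single left-to-right pass that counts zero-run starts (a '0' whose previous character is not '0').
import Mathlib
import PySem

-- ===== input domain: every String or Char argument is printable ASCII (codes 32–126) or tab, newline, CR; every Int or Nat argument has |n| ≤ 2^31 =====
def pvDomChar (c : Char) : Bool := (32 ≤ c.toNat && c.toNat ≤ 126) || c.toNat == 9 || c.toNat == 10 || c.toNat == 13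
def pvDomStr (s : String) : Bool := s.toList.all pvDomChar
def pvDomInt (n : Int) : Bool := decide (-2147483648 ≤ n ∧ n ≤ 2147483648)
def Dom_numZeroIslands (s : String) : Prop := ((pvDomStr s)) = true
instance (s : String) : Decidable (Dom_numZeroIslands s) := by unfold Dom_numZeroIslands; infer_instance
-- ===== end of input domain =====

-- B replaces A's fence/join/split('1')/filter pipeline with one pass counting zero-run starts; same value on every binary string.

-- ===== PORT A =====
def numZeroIslands (s : String) : Int :=
  let cs := s.toList
  if PySem.Str.len s = 0 then 0
  else
    let single_fenced : List Char :=
      ((PySem.List.enumerate cs 0).filter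
        (fun p => p.1 == 0 || p.2 == '0' || !(PySem.List.pyGetD cs (p.1 - 1) ' ' == '1'))).map (·.2)
    let as_str := PySem.Chars.join [] (single_fenced.map (fun c => [c]))
    let split_into_groups := PySem.Chars.splitOn as_str ['1']
    let filtered_groups := split_into_groups.filter (fun g => !(g == ([] : List Char)))
    (filtered_groups.length : Int)

-- ===== PORT B =====
def numZeroIslands_alt (s : String) : Int :=
  if PySem.Str.len s = 0 then 0
  else
    (s.toList.foldl
      (fun (st : Int × Char) c =>
        (if c == '0' && !(st.2 == '0') then st.1 + 1 else st.1, c))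
      (0, '1')).1

-- ===== PRECONDITION & SPEC =====
-- A's assert raises AssertionError on any non-empty string containing a character other than '0'/'1'; those inputs are excluded.
def Pre_numZeroIslands (s : String) : Prop := (s.toList.all (fun c => c == '0' || c == '1')) = true
instance (s : String) : Decidable (Pre_numZeroIslands s) := by unfold Pre_numZeroIslands; infer_instance
def pvWitness_numZeroIslands : String := "010"

def Spec_numZeroIslands (s : String) (out : Int) : Prop := out = numZeroIslands_alt s
instance (s : String) (out : Int) : Decidable (Spec_numZeroIslands s out) := by unfold Spec_numZeroIslands; infer_instance

-- ===== CLAIM (what is proved, stated in full; the proofs are below) =====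
def Claim_equal_numZeroIslands : Prop := ∀ (s : String), Dom_numZeroIslands s → Pre_numZeroIslands s → Spec_numZeroIslands s (numZeroIslands s)

-- ===== LEMMAS AND PROOFS =====

-- structural model of s.split('1') on the char level
def splitOne : List Char → List (List Char)
  | [] => [[]]
  | c :: t => if c = '1' then [] :: splitOne t else (splitOne t).modifyHead (c :: ·)

theorem splitOne_ne_nil (l : List Char) : splitOne l ≠ [] := by
  cases l with
  | nil => simp [splitOne]
  | cons c t =>
    simp only [splitOne]
    split_ifs
    · simp
    · cases h : splitOne t with
      | nil => exact absurd h (splitOne_ne_nil t)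
      | cons a r => simp [h]

theorem modifyHead_triv (l : List (List Char)) : l.modifyHead (fun x => x) = l := by
  cases l <;> simp

theorem splitOn_go_eq (l : List Char) : ∀ (fuel : Nat), l.length ≤ fuel →
    ∀ (cur : List Char) (acc : List (List Char)),
    PySem.Chars.splitOn.go ['1'] (fuel + 1) l cur acc
      = acc.reverse ++ (splitOne l).modifyHead (cur.reverse ++ ·) := by
  induction l with
  | nil => intro fuel _ cur acc; simp [PySem.Chars.splitOn.go, splitOne]
  | cons c t ih =>
    intro fuel hf cur acc
    obtain ⟨f, rfl⟩ : ∃ f, fuel = f + 1 := ⟨fuel - 1, by simp at hf; omega⟩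
    by_cases hc : c = '1'
    · subst hc
      have hpre : (['1'].isPrefixOf ('1' :: t)) = true := by simp [List.isPrefixOf]
      simp only [PySem.Chars.splitOn.go, hpre, if_true, List.length_cons, List.length_nil, List.drop_succ_cons, List.drop_zero]
      rw [ih f (by simpa using hf) [] (cur.reverse :: acc)]
      simp [splitOne, modifyHead_triv]
    · have hpre : (['1'].isPrefixOf (c :: t)) = false := by
        simp [List.isPrefixOf]; exact fun h => hc h.symm
      simp only [PySem.Chars.splitOn.go, hpre, Bool.false_eq_true, if_false]
      rw [ih f (by simpa using hf) (c :: cur) acc]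
      simp only [splitOne, hc, if_false]
      cases h : splitOne t with
      | nil => exact absurd h (splitOne_ne_nil t)
      | cons a r => simp

theorem splitOn_eq_splitOne (l : List Char) :
    PySem.Chars.splitOn l ['1'] = splitOne l := by
  have := splitOn_go_eq l l.length (le_refl _) [] []
  simpa [PySem.Chars.splitOn, modifyHead_triv] using this

-- A's fence: keep c iff it is '0' or the previous char is not '1' (the head is always kept)
def fenceGo : Char → List Char → List Char
  | _, [] => []
  | prev, c :: t => (if c = '0' ∨ prev ≠ '1' then [c] else []) ++ fenceGo c t

-- B's counter, recursively
def cnt : Char → List Char → Int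
  | _, [] => 0
  | prev, c :: t => (if c = '0' ∧ prev ≠ '0' then 1 else 0) + cnt c t

theorem foldl_eq_cnt (l : List Char) : ∀ (a : Int) (prev : Char),
    (l.foldl (fun (st : Int × Char) c =>
        (if c == '0' && !(st.2 == '0') then st.1 + 1 else st.1, c)) (a, prev)).1
      = a + cnt prev l := by
  induction l with
  | nil => intro a prev; simp [cnt]
  | cons c t ih =>
    intro a prev
    simp only [List.foldl_cons, cnt]
    by_cases h : c = '0' ∧ prev ≠ '0'
    · rw [if_pos (by simp [h.1, h.2]), ih, if_pos h]; ring
    · rw [if_neg (by simp only [Bool.and_eq_true, beq_iff_eq, Bool.not_eq_true', beq_eq_false_iff_ne]; tauto),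
        ih, if_neg h]
      ring

-- number of non-empty groups
def ne1 (xs : List (List Char)) : Int := ((xs.filter (fun g => !(g == ([] : List Char)))).length : Int)

theorem ne1_cons_nil (r : List (List Char)) : ne1 ([] :: r) = ne1 r := by simp [ne1]
theorem ne1_cons_cons (c : Char) (h : List Char) (r : List (List Char)) :
    ne1 ((c :: h) :: r) = 1 + ne1 r := by simp [ne1]; omega

-- head of splitOne (fenceGo '0' t) is non-empty iff t starts with '0'
theorem fence_head (t : List Char) (ht : ∀ c ∈ t, c = '0' ∨ c = '1') :
    (splitOne (fenceGo '0' t)).headD [] = [] ↔ ¬ (t.head? = some '0') := by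
  cases t with
  | nil => simp [fenceGo, splitOne]
  | cons c' t' =>
    have hc' := ht c' (by simp)
    rcases hc' with h0 | h1
    · subst h0
      have hfg : fenceGo '0' ('0' :: t') = '0' :: fenceGo '0' t' := by simp [fenceGo]
      rw [hfg]
      simp only [splitOne, if_neg (by decide : ¬ ('0' : Char) = '1')]
      cases h : splitOne (fenceGo '0' t') with
      | nil => exact absurd h (splitOne_ne_nil _)
      | cons a r => simp [h]
    · subst h1
      simp [fenceGo, splitOne]

-- main counting lemma
theorem cnt_eq_ne1 (l : List Char) (hl : ∀ c ∈ l, c = '0' ∨ c = '1') : ∀ (prev : Char),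
    cnt prev l + (if prev = '0' ∧ l.head? = some '0' then 1 else 0)
      = ne1 (splitOne (fenceGo prev l)) := by
  induction l with
  | nil => intro prev; simp [cnt, fenceGo, splitOne, ne1]
  | cons c t ih =>
    intro prev
    have hbt : ∀ x ∈ t, x = '0' ∨ x = '1' := fun x hx => hl x (by simp [hx])
    rcases hl c (by simp) with h0 | h1
    · -- c = '0'
      subst h0
      have hfg : fenceGo prev ('0' :: t) = '0' :: fenceGo '0' t := by
        simp [fenceGo]
      rw [hfg]
      simp only [splitOne, if_neg (by decide : ¬ ('0' : Char) = '1')]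
      cases hsp : splitOne (fenceGo '0' t) with
      | nil => exact absurd hsp (splitOne_ne_nil _)
      | cons h r =>
        simp only [List.modifyHead_cons, ne1_cons_cons]
        have ihs := ih hbt '0'
        rw [hsp] at ihs
        have hhead := fence_head t hbt
        rw [hsp] at hhead
        simp only [List.headD_cons] at hhead
        have hr : ne1 (h :: r) = ne1 r + (if t.head? = some '0' then 1 else 0) := by
          by_cases hh : h = []
          · rw [hh, ne1_cons_nil, if_neg (hhead.mp hh)]; ring
          · cases h with
            | nil => exact absurd rfl hh
            | cons x xs =>
              rw [ne1_cons_cons, if_pos (by by_contra hcon; exact hh (hhead.mpr hcon))]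
              ring
        rw [hr] at ihs
        have ihs' : cnt '0' t = ne1 r := by
          by_cases ht0 : t.head? = some '0' <;> simp only [ht0, if_pos, if_neg, eq_self_iff_true,
            true_and, and_true, if_true, if_false] at ihs <;> simp [ht0] at ihs <;> linarith
        simp only [cnt, List.head?_cons]
        by_cases hp : prev = '0'
        · rw [if_neg (by simp [hp]), if_pos (by simp [hp])]
          linarith [ihs']
        · rw [if_pos (by simp [hp]), if_neg (by simp [hp])]
          linarith [ihs']
    · -- c = '1'
      subst h1
      have ihs := ih hbt '1'
      rw [if_neg (by simp)] at ihs
      by_cases hp : prev = '1'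
      · subst hp
        have hfg : fenceGo '1' ('1' :: t) = fenceGo '1' t := by simp [fenceGo]
        rw [hfg, ← ihs]
        simp [cnt]
      · have hfg : fenceGo prev ('1' :: t) = '1' :: fenceGo '1' t := by
          simp [fenceGo, hp]
        rw [hfg]
        have hsp1 : splitOne ('1' :: fenceGo '1' t) = [] :: splitOne (fenceGo '1' t) := by
          simp [splitOne]
        rw [hsp1, ne1_cons_nil, ← ihs]
        simp [cnt]

-- the enumerate/pyGetD comprehension equals the fence
theorem fence_eq (t : List Char) : ∀ (pre : List Char) (h : pre ≠ []),
    ((PySem.List.enumerate t (pre.length : Int)).filter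
        (fun p => p.1 == 0 || p.2 == '0' || !(PySem.List.pyGetD (pre ++ t) (p.1 - 1) ' ' == '1'))).map (·.2)
      = fenceGo (pre.getLast h) t := by
  induction t with
  | nil => intro pre h; simp [PySem.List.enumerate, fenceGo]
  | cons c t' ih =>
    intro pre h
    have hlen : 1 ≤ pre.length := List.length_pos_iff.mpr h
    have hidx : PySem.List.pyGetD (pre ++ c :: t') ((pre.length : Int) - 1) ' ' = pre.getLast h := by
      have hc : ((pre.length : Int) - 1) = ((pre.length - 1 : Nat) : Int) := by
        push_cast [hlen]; ring
      rw [hc, PySem.List.pyGetD_natCast]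
      have h1 : pre.length - 1 < pre.length := by omega
      have h2 : (pre ++ c :: t').getD (pre.length - 1) ' ' = pre.getD (pre.length - 1) ' ' := by
        simp [List.getD, List.getElem?_append_left h1]
      rw [h2, List.getLast_eq_getElem]
      exact List.getD_eq_getElem pre ' ' (by omega)
    have ih' := ih (pre ++ [c]) (by simp)
    simp only [List.append_assoc, List.cons_append, List.nil_append, List.length_append,
      List.length_cons, List.length_nil, List.getLast_concat, Nat.cast_add, Nat.cast_ofNat,
      Nat.cast_one, Nat.cast_zero, zero_add, Nat.add_zero] at ih'
    rw [PySem.List.enumerate_cons, List.filter_cons]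
    by_cases hcond : c = '0' ∨ pre.getLast h ≠ '1'
    · rw [if_pos (by
        simp only [Bool.or_eq_true, beq_iff_eq, Bool.not_eq_true', beq_eq_false_iff_ne, hidx]
        tauto)]
      simp only [List.map_cons, ih', fenceGo, if_pos hcond, List.singleton_append]
    · rw [if_neg (by
        push_neg at hcond
        simp only [Bool.or_eq_true, beq_iff_eq, Bool.not_eq_true', beq_eq_false_iff_ne, hidx]
        push_neg
        exact ⟨⟨Nat.cast_ne_zero.mpr (by omega), hcond.1⟩, hcond.2⟩)]
      simp only [ih', fenceGo, if_neg hcond, List.nil_append]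

theorem main_list (c0 : Char) (t : List Char) (hpre : ∀ c ∈ c0 :: t, c = '0' ∨ c = '1') :
    (((PySem.Chars.splitOn
          (PySem.Chars.join []
            ((((PySem.List.enumerate (c0 :: t)).filter
                (fun p => p.1 == 0 || p.2 == '0' || !(PySem.List.pyGetD (c0 :: t) (p.1 - 1) ' ' == '1'))).map
              (·.2)).map (fun c => [c])))
          ['1']).filter (fun g => !(g == ([] : List Char)))).length : Int)
      = ((c0 :: t).foldl (fun (st : Int × Char) c =>
          (if c == '0' && !(st.2 == '0') then st.1 + 1 else st.1, c)) (0, '1')).1 := by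
  have h1 : ((PySem.List.enumerate (c0 :: t) 0).filter
        (fun p => p.1 == 0 || p.2 == '0' || !(PySem.List.pyGetD (c0 :: t) (p.1 - 1) ' ' == '1'))).map (·.2)
      = c0 :: fenceGo c0 t := by
    rw [PySem.List.enumerate_cons, List.filter_cons, if_pos (by simp), List.map_cons]
    have hfe := fence_eq t [c0] (by simp)
    simp only [List.length_cons, List.length_nil, Nat.cast_one, Nat.cast_zero, zero_add,
      List.getLast_singleton, List.cons_append, List.nil_append] at hfe
    rw [zero_add, hfe]
  rw [h1, PySem.Chars.join_nil_singletons, splitOn_eq_splitOne]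
  have h4 : ne1 (splitOne (c0 :: fenceGo c0 t)) = ne1 (splitOne (fenceGo '1' (c0 :: t))) := by
    rcases hpre c0 (by simp) with h0 | h1
    · subst h0
      have hfg : fenceGo '1' ('0' :: t) = '0' :: fenceGo '0' t := by simp [fenceGo]
      rw [hfg]
    · subst h1
      have hfg : fenceGo '1' ('1' :: t) = fenceGo '1' t := by simp [fenceGo]
      have hsp1 : splitOne ('1' :: fenceGo '1' t) = [] :: splitOne (fenceGo '1' t) := by
        simp [splitOne]
      rw [hfg, hsp1, ne1_cons_nil]
  have h5 := cnt_eq_ne1 (c0 :: t) hpre '1'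
  rw [if_neg (by simp)] at h5
  have h6 := foldl_eq_cnt (c0 :: t) 0 '1'
  show ne1 (splitOne (c0 :: fenceGo c0 t)) = _
  rw [h4, ← h5, h6]
  ring

-- ===== VERDICT (by name: the statement is the Claim_ definition above) =====
theorem numZeroIslands_spec : Claim_equal_numZeroIslands := by
  intro s _ hpre0
  have hpre : ∀ c ∈ s.toList, c = '0' ∨ c = '1' := by
    intro c hc
    have := List.all_eq_true.mp hpre0 c hc
    simpa using this
  clear hpre0
  unfold Spec_numZeroIslands numZeroIslands numZeroIslands_alt at *
  cases hcs : s.toList with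
  | nil => simp [PySem.Str.len_eq, hcs]
  | cons c0 t =>
    rw [hcs] at hpre
    have hlen : ¬ (PySem.Str.len s = 0) := by simp [PySem.Str.len_eq, hcs]; omega
    simp only [hcs, if_neg hlen]
    exact main_list c0 t hpre
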